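-- pv_equiv track=rewrite | github.com/dlvql/Algorithm | 프로그래머스/0/120815. 피자 나눠 먹기 （2）/피자 나눠 먹기 （2）.py | solution
-- ===== SOURCE A (Python) =====
-- def solution(n):
--     x, y, z = [n, 6, -1]
--     while True:
--         z = x % y
--         if z == 0:
--             break
--         x, y = y, z
--     return n // y
-- ===== SOURCE B (Python) =====
-- def solution(n):
--     g = 1
--     if n % 2 == 0:
--         g *= 2
--     if n % 3 == 0:
--         g *= 3
--     return n // g
-- ===== Notes on version B (the rewrite author's own statement) =====
-- stated objective: simpler
-- what changed: Replaces the Euclidean gcd loop with direct divisibility checks on the fixed prime factors two and three of the constant divisor, building g as their product and returning n // g.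
import Mathlib
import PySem

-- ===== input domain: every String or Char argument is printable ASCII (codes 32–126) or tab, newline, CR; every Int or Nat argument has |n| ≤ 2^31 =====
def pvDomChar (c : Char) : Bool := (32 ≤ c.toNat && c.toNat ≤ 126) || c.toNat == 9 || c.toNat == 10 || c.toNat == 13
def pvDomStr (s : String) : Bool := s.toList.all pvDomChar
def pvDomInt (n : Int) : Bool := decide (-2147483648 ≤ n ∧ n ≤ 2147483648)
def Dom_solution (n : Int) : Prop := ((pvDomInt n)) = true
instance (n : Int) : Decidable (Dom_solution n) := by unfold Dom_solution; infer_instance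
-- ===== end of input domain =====

-- B replaces A's Euclidean gcd loop with direct divisibility checks on the fixed factors two and three of the constant divisor (objective: simpler).


-- ===== PORT A =====
-- the 'while True' loop: z = x % y; break when z = 0, else (x, y) := (y, z).
-- It terminates because for 0 < y we have 0 ≤ x % y < y (Python floor mod); y starts at 6.
def solutionLoop (x y : Int) : Int :=
  if h : 0 < y then
    let z := PySem.Int.mod x y
    if z = 0 then y else solutionLoop y z
  else y
termination_by y.toNat
decreasing_by
  have e : PySem.Int.mod x y = x % y := PySem.Int.mod_eq_emod_of_pos h
  have h2 : x % y < y := Int.emod_lt_of_pos x h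
  have h1 : 0 ≤ x % y := Int.emod_nonneg x (by omega)
  simp only [e]
  omega

def solution (n : Int) : Int := PySem.Int.floordiv n (solutionLoop n 6)

-- ===== PORT B =====
def solution_alt (n : Int) : Int :=
  let g : Int := 1
  let g := if PySem.Int.mod n 2 = 0 then g * 2 else g
  let g := if PySem.Int.mod n 3 = 0 then g * 3 else g
  PySem.Int.floordiv n g

-- ===== PRECONDITION & SPEC =====
def Spec_solution (n : Int) (out : Int) : Prop := out = solution_alt n
instance (n : Int) (out : Int) : Decidable (Spec_solution n out) := by unfold Spec_solution; infer_instance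

-- ===== CLAIM (what is proved, stated in full; the proofs are below) =====
def Claim_equal_solution : Prop := ∀ (n : Int), Dom_solution n → Spec_solution n (solution n)

-- ===== LEMMAS AND PROOFS =====

-- one step of A's loop, with Python's mod rewritten to emod (valid since the divisor is positive)
theorem loop_step (x y : Int) (hy : 0 < y) :
    solutionLoop x y = if x % y = 0 then y else solutionLoop y (x % y) := by
  rw [solutionLoop]
  simp only [hy, dif_pos, PySem.Int.mod_eq_emod_of_pos hy]

-- A's loop on (n, 6) computes exactly B's product of divisibility factors
theorem loop_eq (n : Int) :
    solutionLoop n 6 =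
      (if n % 3 = 0 then (if n % 2 = 0 then (1:Int) * 2 else 1) * 3
       else (if n % 2 = 0 then (1:Int) * 2 else 1)) := by
  rw [loop_step n 6 (by norm_num)]
  by_cases h2 : n % 2 = 0 <;> by_cases h3 : n % 3 = 0
  · have h6 : n % 6 = 0 := by omega
    simp [h6, h2, h3]
  · have h6 : n % 6 = 2 ∨ n % 6 = 4 := by omega
    rcases h6 with h6 | h6
    · rw [if_neg (by omega), h6, loop_step 6 2 (by norm_num)]
      norm_num [h2, h3]
    · rw [if_neg (by omega), h6, loop_step 6 4 (by norm_num)]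
      norm_num [h3]
      rw [loop_step 4 2 (by norm_num)]
      norm_num [h2]
  · have h6 : n % 6 = 3 := by omega
    rw [if_neg (by omega), h6, loop_step 6 3 (by norm_num)]
    norm_num [h2, h3]
  · have h6 : n % 6 = 1 ∨ n % 6 = 5 := by omega
    rcases h6 with h6 | h6
    · rw [if_neg (by omega), h6, loop_step 6 1 (by norm_num)]
      norm_num [h2, h3]
    · rw [if_neg (by omega), h6, loop_step 6 5 (by norm_num)]
      norm_num [h2, h3]
      rw [loop_step 5 1 (by norm_num)]
      norm_num

-- ===== VERDICT (by name: the statement is the Claim_ definition above) =====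
theorem solution_spec : Claim_equal_solution := by
  intro n _
  unfold Spec_solution solution solution_alt
  have e2 : PySem.Int.mod n 2 = n % 2 := PySem.Int.mod_eq_emod_of_pos (by norm_num)
  have e3 : PySem.Int.mod n 3 = n % 3 := PySem.Int.mod_eq_emod_of_pos (by norm_num)
  rw [loop_eq, e2, e3]
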